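-- pv_equiv track=rewrite | github.com/jacksonsdean/schoolwork | Fall 2015/Comp 123/Code/urlexamples.py | justText
-- ===== SOURCE A (Python) =====
-- def justText(text):
--     """Takes in a string of HTML text and loops through the positions
--     in the string. It keeps a flag
--     variable, inText, that indicates when the characters from the HTML
--     page are regular text, and when it is reading characters from a tag.
--     When it is reading regular text, it adds the characters to the output
--     string. It skips the characters from tags.  It returns the resulting
--     string of regular text."""
--     inText = True
--     outputText = ""
--     for pos in range(len(text)):
--         if text[pos] == "<":
--             inText = False
--         elif text[pos] == ">":
--             inText = True
--         elif inText == True: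
--             outputText = outputText + text[pos]
--     return outputText
-- ===== SOURCE B (Python) =====
-- def justText(text):
--     parts = text.split('<')
--     pieces = [parts[0].replace('>', '')]
--     for seg in parts[1:]:
--         _, sep, tail = seg.partition('>')
--         if sep:
--             pieces.append(tail.replace('>', ''))
--     return ''.join(pieces)
-- ===== Notes on version B (the rewrite author's own statement) =====
-- stated objective: alternative
-- what changed: Replaces the per-character state-machine loop with a split-on-tag-open decomposition: keep the pre-tag segment and, for each later segment, the text after its first tag-close, stripping stray close brackets from every kept piece.
import Mathlib
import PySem

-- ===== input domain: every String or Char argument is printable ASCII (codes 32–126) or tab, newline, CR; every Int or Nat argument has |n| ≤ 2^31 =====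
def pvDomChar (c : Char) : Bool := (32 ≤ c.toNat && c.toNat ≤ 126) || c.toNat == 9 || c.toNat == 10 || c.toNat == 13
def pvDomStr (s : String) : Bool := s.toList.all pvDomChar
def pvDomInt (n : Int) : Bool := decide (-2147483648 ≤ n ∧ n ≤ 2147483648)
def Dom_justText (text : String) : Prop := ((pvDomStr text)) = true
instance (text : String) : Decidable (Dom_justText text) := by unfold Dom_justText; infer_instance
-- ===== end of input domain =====

-- B replaces A's per-character state-machine loop by a split-on-'<' decomposition
-- (keep pre-tag text; per later segment, keep the text after its first '>', dropping stray '>'); same values, O(n).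

-- ===== PORT A =====
-- A: flag inText + output accumulator, one pass over the characters (output kept as List Char).
def justText (text : String) : String :=
  String.mk (text.toList.foldl (fun (st : Bool × List Char) c =>
    if c = '<' then (false, st.2)
    else if c = '>' then (true, st.2)
    else if st.1 then (st.1, st.2 ++ [c])
    else st) (true, [])).2

-- ===== PORT B =====
-- port of text.split('<'): returns (first segment, later segments)
def pvSplitLt : List Char → List Char × List (List Char)
  | [] => ([], [])
  | c :: t =>
    let p := pvSplitLt t
    if c = '<' then ([], p.1 :: p.2) else (c :: p.1, p.2)

-- port of: _, sep, tail = seg.partition('>'); tail.replace('>','') if sep else ''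
def pvTailPiece (seg : List Char) : List Char :=
  match seg.dropWhile (· ≠ '>') with
  | [] => []
  | _ :: rest => rest.filter (· ≠ '>')

def justText_alt (text : String) : String :=
  String.mk ((pvSplitLt text.toList).1.filter (· ≠ '>') ++
    ((pvSplitLt text.toList).2.map pvTailPiece).flatten)

-- ===== PRECONDITION & SPEC =====
def Spec_justText (text : String) (out : String) : Prop := out = justText_alt text
instance (text : String) (out : String) : Decidable (Spec_justText text out) := by unfold Spec_justText; infer_instance

-- ===== CLAIM (what is proved, stated in full; the proofs are below) =====
def Claim_equal_justText : Prop := ∀ (text : String), Dom_justText text → Spec_justText text (justText text)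

-- ===== LEMMAS AND PROOFS =====

-- recursive rendering of A's state machine (proof helper)
def pvF (b : Bool) : List Char → List Char
  | [] => []
  | c :: t =>
    if c = '<' then pvF false t
    else if c = '>' then pvF true t
    else if b then c :: pvF b t
    else pvF b t

theorem pvFoldA (l : List Char) : ∀ (b : Bool) (acc : List Char),
    (l.foldl (fun (st : Bool × List Char) c =>
      if c = '<' then (false, st.2)
      else if c = '>' then (true, st.2)
      else if st.1 then (st.1, st.2 ++ [c])
      else st) (b, acc)).2 = acc ++ pvF b l := by
  induction l with
  | nil => intro b acc; simp [pvF]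
  | cons c t ih =>
    intro b acc
    by_cases h1 : c = '<'
    · simp [pvF, h1, List.foldl_cons, ih]
    · by_cases h2 : c = '>'
      · simp [pvF, h1, h2, List.foldl_cons, ih]
      · cases b with
        | true => simp [pvF, h1, h2, List.foldl_cons, ih]
        | false => simp [pvF, h1, h2, List.foldl_cons, ih]

theorem pvF_eq (l : List Char) :
    pvF true l = (pvSplitLt l).1.filter (· ≠ '>') ++ ((pvSplitLt l).2.map pvTailPiece).flatten ∧
    pvF false l = ((pvSplitLt l).1 :: (pvSplitLt l).2).flatMap pvTailPiece := by
  induction l with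
  | nil => simp [pvF, pvSplitLt, pvTailPiece]
  | cons c t ih =>
    obtain ⟨ihT, ihF⟩ := ih
    by_cases h1 : c = '<'
    · constructor
      · simp [pvF, pvSplitLt, h1, ihF, pvTailPiece, List.flatMap]
      · simp [pvF, pvSplitLt, h1, ihF, pvTailPiece, List.flatMap]
    · by_cases h2 : c = '>'
      · constructor
        · simp [pvF, pvSplitLt, h1, h2, ihT]
        · simp [pvF, pvSplitLt, h1, h2, ihT, pvTailPiece, List.dropWhile, List.flatMap]
      · constructor
        · simp [pvF, pvSplitLt, h1, h2, ihT]
        · simp [pvF, pvSplitLt, h1, h2, ihF, pvTailPiece, List.dropWhile, List.flatMap]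

-- ===== VERDICT (by name: the statement is the Claim_ definition above) =====
theorem justText_spec : Claim_equal_justText := by
  intro text _
  unfold Spec_justText justText justText_alt
  rw [pvFoldA]
  simp [(pvF_eq text.toList).1]
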